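-- pv_equiv track=rewrite | github.com/generalaimodels/genaiapplication | chatbot/torchchuck.py | _drop_ascii_bar_lines
-- ===== SOURCE A (Python) =====
-- from typing import (
--     Any,
--     Dict,
--     List,
--     Literal,
--     Optional,
--     Sequence,
--     Tuple,
--     Union,
-- )
--
-- def _drop_ascii_bar_lines(text: str, bar_min_len: int, charset: str) -> str:
--     """
--     Remove lines composed entirely of punctuation from 'charset' (ignoring spaces/tabs) if length >= bar_min_len.
--     Fix: parameter renamed to 'bar_min_len' to match call sites and CLI flags; previously named 'min_len' caused a TypeError.
--     """
--     if bar_min_len <= 0 or not text: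
--         return text
--     out_lines: List[str] = []
--     for ln in text.splitlines():
--         core = ln.strip()
--         if not core:
--             out_lines.append(ln)
--             continue
--         core_compact = core.replace(" ", "").replace("\t", "")
--         if len(core_compact) >= bar_min_len and core_compact and all((c in charset) for c in core_compact):
--             # Drop this noise bar line (e.g., "-----", "======", "********", "────────")
--             continue
--         out_lines.append(ln)
--     return "\n".join(out_lines)
-- ===== SOURCE B (Python) =====
-- def _drop_ascii_bar_lines(text: str, bar_min_len: int, charset: str) -> str:
--     """Single streaming pass over the characters: per-line O(1) state (a count of
--     non-space/tab chars and a 'saw a char outside charset' flag) decides each line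
--     at its line break; no strip/replace/compacted strings are ever built."""
--     if bar_min_len <= 0 or not text:
--         return text
--     allowed = frozenset(charset)
--     kept = []
--     buf = []        # characters of the current line
--     solid = 0       # number of non-space/tab characters in the current line
--     dirty = False   # current line has a non-space/tab character outside charset
--     i = 0
--     n = len(text)
--     while i < n:
--         c = text[i]
--         if c == '\n' or c == '\r':
--             if dirty or solid < bar_min_len:
--                 kept.append(''.join(buf))
--             buf = []
--             solid = 0
--             dirty = False
--             if c == '\r' and i + 1 < n and text[i + 1] == '\n':
--                 i += 2
--             else:
--                 i += 1
--         else: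
--             buf.append(c)
--             if c != ' ' and c != '\t':
--                 solid += 1
--                 if c not in allowed:
--                     dirty = True
--             i += 1
--     if buf:
--         if dirty or solid < bar_min_len:
--             kept.append(''.join(buf))
--     return '\n'.join(kept)
-- ===== Notes on version B (the rewrite author's own statement) =====
-- stated objective: alternative
-- what changed: A splits into lines and, per line, builds stripped and space/tab-compacted copies of the line and scans them with all(c in charset); B never builds any derived string: it makes one streaming pass over the raw characters, maintaining O(1) per-line state (a count of non-space/tab characters and a dirty flag for a character outside a precomputed frozenset) and deciding each line at its line break.
import Mathlib
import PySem

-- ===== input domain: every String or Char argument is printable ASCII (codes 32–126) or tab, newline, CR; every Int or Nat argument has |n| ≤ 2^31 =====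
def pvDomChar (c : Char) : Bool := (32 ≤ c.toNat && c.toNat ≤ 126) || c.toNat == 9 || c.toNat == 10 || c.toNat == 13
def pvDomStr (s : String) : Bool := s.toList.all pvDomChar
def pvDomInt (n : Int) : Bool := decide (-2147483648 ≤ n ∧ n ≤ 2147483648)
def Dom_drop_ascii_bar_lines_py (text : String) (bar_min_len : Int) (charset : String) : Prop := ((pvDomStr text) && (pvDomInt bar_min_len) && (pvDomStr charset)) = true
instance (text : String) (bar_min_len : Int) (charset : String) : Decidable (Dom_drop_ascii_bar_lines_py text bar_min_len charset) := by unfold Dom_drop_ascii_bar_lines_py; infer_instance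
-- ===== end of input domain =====

-- B replaces A's per-line derived strings (strip, two replaces, a membership scan of the
-- compacted core) by ONE streaming pass over the raw characters with O(1) per-line state
-- (a non-whitespace count and a dirty flag), deciding each line at its break (objective: alternative).

-- ===== PORT A =====
def drop_ascii_bar_lines_py (text : String) (bar_min_len : Int) (charset : String) : String :=
  if bar_min_len ≤ 0 ∨ text = "" then text
  else
    let out_lines : List String :=
      (PySem.Str.splitlines text).foldl (fun out_lines ln =>
        let core := PySem.Str.strip ln
        if core = "" then out_lines ++ [ln]
        else
          let core_compact := PySem.Str.replace (PySem.Str.replace core " " "") "\t" ""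
          if bar_min_len ≤ PySem.Str.len core_compact ∧ core_compact ≠ "" ∧
              (core_compact.toList.all fun c => PySem.Str.isIn (String.ofList [c]) charset) = true then
            out_lines  -- drop this noise bar line ('continue')
          else
            out_lines ++ [ln]) []
    PySem.Str.join "\n" out_lines

-- ===== PORT B =====
-- the while loop of Source B: s = remaining text, buf = chars of the current line (in order),
-- solid = non-space/tab chars so far, dirty = saw a non-space/tab char outside charset,
-- kept = lines kept so far; 'text[i+1] == \n' lookahead is rest.head?, 'i += 2' is rest.tail
def pvStreamGo (bar_min_len : Int) (allowed : PySem.Set Char) :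
    List Char → List Char → Nat → Bool → List String → List String
  | [], buf, solid, dirty, kept =>
      if buf = [] then kept
      else if dirty || decide ((solid : Int) < bar_min_len) then kept ++ [String.ofList buf]
      else kept
  | c :: rest, buf, solid, dirty, kept =>
      if c = '\n' ∨ c = '\r' then
        let kept' := if dirty || decide ((solid : Int) < bar_min_len) then
            kept ++ [String.ofList buf] else kept
        if c = '\r' ∧ rest.head? = some '\n' then
          pvStreamGo bar_min_len allowed rest.tail [] 0 false kept'
        else
          pvStreamGo bar_min_len allowed rest [] 0 false kept'
      else if c = ' ' ∨ c = '\t' then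
        pvStreamGo bar_min_len allowed rest (buf ++ [c]) solid dirty kept
      else
        pvStreamGo bar_min_len allowed rest (buf ++ [c]) (solid + 1)
          (dirty || !(PySem.Set.contains allowed c)) kept
termination_by s _ _ _ _ => s.length
decreasing_by
  all_goals simp [List.length_tail]

def drop_ascii_bar_lines_py_alt (text : String) (bar_min_len : Int) (charset : String) : String :=
  if bar_min_len ≤ 0 ∨ text = "" then text
  else
    PySem.Str.join "\n"
      (pvStreamGo bar_min_len (PySem.Set.ofList charset.toList) text.toList [] 0 false [])

-- ===== PRECONDITION & SPEC =====
def Spec_drop_ascii_bar_lines_py (text : String) (bar_min_len : Int) (charset : String) (out : String) : Prop := out = drop_ascii_bar_lines_py_alt text bar_min_len charset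
instance (text : String) (bar_min_len : Int) (charset : String) (out : String) : Decidable (Spec_drop_ascii_bar_lines_py text bar_min_len charset out) := by unfold Spec_drop_ascii_bar_lines_py; infer_instance

-- ===== CLAIM (what is proved, stated in full; the proofs are below) =====
def Claim_equal_drop_ascii_bar_lines_py : Prop := ∀ (text : String) (bar_min_len : Int) (charset : String), Dom_drop_ascii_bar_lines_py text bar_min_len charset → Spec_drop_ascii_bar_lines_py text bar_min_len charset (drop_ascii_bar_lines_py text bar_min_len charset)

-- ===== LEMMAS AND PROOFS =====

-- A's drop condition, named so that A's fold body becomes a single if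
abbrev pvDropA (m : Int) (charset : String) (ln : String) : Prop :=
  PySem.Str.strip ln ≠ "" ∧
  (m ≤ PySem.Str.len (PySem.Str.replace (PySem.Str.replace (PySem.Str.strip ln) " " "") "\t" "") ∧
   PySem.Str.replace (PySem.Str.replace (PySem.Str.strip ln) " " "") "\t" "" ≠ "" ∧
   ((PySem.Str.replace (PySem.Str.replace (PySem.Str.strip ln) " " "") "\t" "").toList.all
      fun c => PySem.Str.isIn (String.ofList [c]) charset) = true)

-- the per-line bar test both sides boil down to
def pvIsBar (bar_min_len : Int) (allowed : PySem.Set Char) (ln : String) : Bool :=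
  let body := ln.toList.filter fun c => !(c == ' ') && !(c == '\t')
  decide (bar_min_len ≤ (body.length : Int)) && (body.all fun c => PySem.Set.contains allowed c)

def pvLineOk (c : Char) : Prop := (32 ≤ c.toNat ∧ c.toNat ≤ 126) ∨ c.toNat = 9

-- the line-break predicate splitlines uses, as a named function (definitional copy)
def pvIsB (c : Char) : Bool :=
  decide (c.toNat = 10) || decide (c.toNat = 13) || decide (c.toNat = 11) || decide (c.toNat = 12) ||
    decide (c.toNat = 28) || decide (c.toNat = 29) || decide (c.toNat = 30) ||
    decide (c.toNat = 133) || decide (c.toNat = 8232) || decide (c.toNat = 8233)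

theorem pv_splitlines_eq_go (s : List Char) :
    PySem.Chars.splitlines s = PySem.Chars.splitlines.go pvIsB s [] [] := rfl

theorem pv_replace_go_filter (a : Char) :
    ∀ (fuel : Nat) (l acc : List Char), l.length ≤ fuel →
      PySem.Chars.replace.go [a] [] fuel l acc = acc.reverse ++ l.filter (fun c => !(c == a)) := by
  intro fuel
  induction fuel with
  | zero => intro l acc h
            cases l with
            | nil => rw [PySem.Chars.replace.go.eq_def]; simp
            | cons c t => simp at h
  | succ n ih =>
    intro l acc h
    cases l with
    | nil => rw [PySem.Chars.replace.go.eq_def]; simp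
    | cons c t =>
      rw [PySem.Chars.replace.go.eq_def]
      by_cases hc : c = a
      · subst hc
        have hpre : List.isPrefixOf [c] (c :: t) = true := by simp [List.isPrefixOf]
        simp only [hpre, if_true]
        have hdrop : List.drop [c].length (c :: t) = t := by simp
        rw [hdrop, List.reverse_nil, List.nil_append,
            ih t acc (by simpa using Nat.le_of_succ_le_succ h)]
        simp
      · have hpre : List.isPrefixOf [a] (c :: t) = false := by
          simp [List.isPrefixOf]; exact fun h' => (hc h'.symm).elim
        simp only [hpre, Bool.false_eq_true, if_false]
        rw [ih t (c :: acc) (by simpa using Nat.le_of_succ_le_succ h)]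
        simp [hc]

theorem pv_replace_filter (a : Char) (l : List Char) :
    PySem.Chars.replace l [a] [] = l.filter (fun c => !(c == a)) := by
  have h0 : PySem.Chars.replace l [a] [] = PySem.Chars.replace.go [a] [] l.length l [] := by
    simp [PySem.Chars.replace]
  rw [h0, pv_replace_go_filter a l.length l [] (Nat.le_refl _)]
  simp

theorem pv_filter_dropWhile (p q : Char → Bool) :
    ∀ (l : List Char), (∀ c ∈ l, q c = true → p c = false) →
      (l.dropWhile q).filter p = l.filter p := by
  intro l
  induction l with
  | nil => intro _; rfl
  | cons c t ih =>
    intro h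
    by_cases hq : q c = true
    · rw [List.dropWhile_cons_of_pos hq, ih (fun x hx => h x (List.mem_cons_of_mem _ hx))]
      simp [h c (List.mem_cons_self) hq]
    · rw [List.dropWhile_cons_of_neg hq]

theorem pv_filter_strip (p : Char → Bool) (l : List Char)
    (h : ∀ c ∈ l, PySem.Chars.isspace c = true → p c = false) :
    (PySem.Chars.strip l).filter p = l.filter p := by
  unfold PySem.Chars.strip PySem.Chars.rstrip PySem.Chars.lstrip
  have h1 : ∀ c ∈ (List.dropWhile PySem.Chars.isspace l).reverse, PySem.Chars.isspace c = true → p c = false :=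
    fun c hc => h c (((List.dropWhile_sublist _).mem (List.mem_reverse.mp hc)))
  rw [List.filter_reverse, pv_filter_dropWhile p PySem.Chars.isspace _ h1,
      List.filter_reverse, List.reverse_reverse]
  exact pv_filter_dropWhile p PySem.Chars.isspace l h

theorem pv_char_eq_of_toNat (c d : Char) (h : c.toNat = d.toNat) : c = d := by
  apply Char.ext; apply UInt32.toNat_inj.mp; exact h

-- the compacted core is the whitespace-free body of the line
theorem pv_cc_toList (ln : String) (hchars : ∀ c ∈ ln.toList, pvLineOk c) :
    (PySem.Str.replace (PySem.Str.replace (PySem.Str.strip ln) " " "") "\t" "").toList =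
      ln.toList.filter (fun c => !(c == ' ') && !(c == '\t')) := by
  have hsp : ∀ c ∈ ln.toList, PySem.Chars.isspace c = true →
      (!(c == ' ') && !(c == '\t')) = false := by
    intro c hc hspace
    have hok := hchars c hc
    unfold PySem.Chars.isspace at hspace
    simp only [Bool.or_eq_true, Bool.and_eq_true, decide_eq_true_eq] at hspace
    have : c.toNat = 32 ∨ c.toNat = 9 := by
      unfold pvLineOk at hok; omega
    rcases this with h | h
    · have : c = ' ' := pv_char_eq_of_toNat c ' ' h
      simp [this]
    · have : c = '\t' := pv_char_eq_of_toNat c '\t' h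
      simp [this]
  rw [PySem.Str.toList_replace, PySem.Str.toList_replace, PySem.Str.toList_strip]
  have h1 : (" " : String).toList = [' '] := rfl
  have h2 : ("\t" : String).toList = ['\t'] := rfl
  have h3 : ("" : String).toList = [] := rfl
  rw [h1, h2, h3, pv_replace_filter, pv_replace_filter, List.filter_filter]
  have h4 : (fun c => !(c == '\t') && !(c == ' ')) = (fun c => !(c == ' ') && !(c == '\t')) := by
    funext c; exact Bool.and_comm _ _
  rw [h4]
  exact pv_filter_strip _ ln.toList hsp

-- per-line decision agreement
theorem pv_line_key (m : Int) (hm : 0 < m) (charset : String) (ln : String)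
    (hchars : ∀ c ∈ ln.toList, pvLineOk c) :
    decide (pvDropA m charset ln) = pvIsBar m (PySem.Set.ofList charset.toList) ln := by
  have hcc := pv_cc_toList ln hchars
  set body := ln.toList.filter (fun c => !(c == ' ') && !(c == '\t')) with hbody
  have hlen : PySem.Str.len (PySem.Str.replace (PySem.Str.replace (PySem.Str.strip ln) " " "") "\t" "")
      = (body.length : Int) := by rw [PySem.Str.len_eq, hcc]
  have hall : ((PySem.Str.replace (PySem.Str.replace (PySem.Str.strip ln) " " "") "\t" "").toList.all
      fun c => PySem.Str.isIn (String.ofList [c]) charset)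
      = (body.all fun c => PySem.Set.contains (PySem.Set.ofList charset.toList) c) := by
    apply List.all_congr hcc
    intro c
    apply Bool.eq_iff_iff.mpr
    constructor
    · intro h
      rw [PySem.Str.isIn_eq] at h
      have : c ∈ charset.toList := by
        have := (PySem.Chars.isIn_iff_infix _ _).mp (by simpa using h)
        exact (List.singleton_infix_iff c charset.toList).mp (by simpa using this)
      simp only [PySem.Set.contains, List.contains_iff_mem]
      exact (PySem.Set.mem_ofList charset.toList c).mpr this
    · intro h
      simp only [PySem.Set.contains, List.contains_iff_mem] at h
      have hc : c ∈ charset.toList :=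
        (PySem.Set.mem_ofList charset.toList c).mp (by simpa using h)
      rw [PySem.Str.isIn_eq]
      have : ([c] : List Char) <:+: charset.toList := (List.singleton_infix_iff c charset.toList).mpr hc
      have := (PySem.Chars.isIn_iff_infix [c] charset.toList).mpr this
      simpa using this
  by_cases hstrip : PySem.Chars.strip ln.toList = []
  · have hstr : PySem.Str.strip ln = "" := by
      have h0 : (PySem.Str.strip ln).toList = [] := by rw [PySem.Str.toList_strip, hstrip]
      have h1 := congrArg String.ofList h0
      rw [String.ofList_toList] at h1
      exact h1.trans rfl
    have hb0 : body = [] := by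
      rw [hbody, ← pv_filter_strip (fun c => !(c == ' ') && !(c == '\t')) ln.toList, hstrip]
      · rfl
      · intro c hcmem hspace
        have hok := hchars c hcmem
        unfold PySem.Chars.isspace at hspace
        simp only [Bool.or_eq_true, Bool.and_eq_true, decide_eq_true_eq] at hspace
        have : c.toNat = 32 ∨ c.toNat = 9 := by unfold pvLineOk at hok; omega
        rcases this with h | h
        · simp [pv_char_eq_of_toNat c ' ' h]
        · simp [pv_char_eq_of_toNat c '\t' h]
    have hA : decide (pvDropA m charset ln) = false := by
      simp [pvDropA, hstr]
    have hB : pvIsBar m (PySem.Set.ofList charset.toList) ln = false := by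
      unfold pvIsBar
      rw [← hbody, hb0]
      simp only [List.length_nil, Nat.cast_zero]
      have : ¬ (m ≤ (0 : Int)) := by omega
      simp [this]
    rw [hA, hB]
  · have hstr : PySem.Str.strip ln ≠ "" := by
      intro h
      apply hstrip
      have := congrArg String.toList h
      rw [PySem.Str.toList_strip] at this
      simpa using this
    have hD : pvDropA m charset ln ↔
        (m ≤ (body.length : Int) ∧
          (body.all fun c => PySem.Set.contains (PySem.Set.ofList charset.toList) c) = true) := by
      unfold pvDropA
      rw [hlen, hall]
      constructor
      · rintro ⟨_, h2, _, h4⟩; exact ⟨h2, h4⟩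
      · rintro ⟨h1, h2⟩
        refine ⟨hstr, h1, ?_, h2⟩
        intro h
        have h5 := congrArg String.toList h
        rw [hcc] at h5
        have hb0 : body = [] := by simpa using h5
        rw [hb0] at h1
        simp at h1
        omega
    calc decide (pvDropA m charset ln)
        = decide (m ≤ (body.length : Int) ∧
            (body.all fun c => PySem.Set.contains (PySem.Set.ofList charset.toList) c) = true) :=
          decide_eq_decide.mpr hD
      _ = (decide (m ≤ (body.length : Int)) &&
            (body.all fun c => PySem.Set.contains (PySem.Set.ofList charset.toList) c)) := by
          apply Bool.eq_iff_iff.mpr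
          simp [List.all_eq_true]
      _ = pvIsBar m (PySem.Set.ofList charset.toList) ln := by
          unfold pvIsBar
          rw [← hbody]

-- A's kept lines are exactly the lines that are not bars
theorem pv_lines_eq (text : String) (m : Int) (hm : 0 < m) (charset : String)
    (hlines : ∀ ln ∈ PySem.Str.splitlines text, ∀ c ∈ ln.toList, pvLineOk c) :
    (PySem.Str.splitlines text).foldl (fun out_lines ln =>
        let core := PySem.Str.strip ln
        if core = "" then out_lines ++ [ln]
        else
          let core_compact := PySem.Str.replace (PySem.Str.replace core " " "") "\t" ""
          if m ≤ PySem.Str.len core_compact ∧ core_compact ≠ "" ∧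
              (core_compact.toList.all fun c => PySem.Str.isIn (String.ofList [c]) charset) = true then
            out_lines
          else out_lines ++ [ln]) [] =
      (PySem.Str.splitlines text).filter fun ln => !pvIsBar m (PySem.Set.ofList charset.toList) ln := by
  have hstep : (PySem.Str.splitlines text).foldl (fun out_lines ln =>
        let core := PySem.Str.strip ln
        if core = "" then out_lines ++ [ln]
        else
          let core_compact := PySem.Str.replace (PySem.Str.replace core " " "") "\t" ""
          if m ≤ PySem.Str.len core_compact ∧ core_compact ≠ "" ∧
              (core_compact.toList.all fun c => PySem.Str.isIn (String.ofList [c]) charset) = true then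
            out_lines
          else out_lines ++ [ln]) [] =
      (PySem.Str.splitlines text).foldl
        (fun out ln => if ¬ pvDropA m charset ln then out ++ [ln] else out) [] := by
    apply PySem.List.foldl_congr_mem'
    intro ln _ out
    show (if PySem.Str.strip ln = "" then out ++ [ln]
          else
            if m ≤ PySem.Str.len (PySem.Str.replace (PySem.Str.replace (PySem.Str.strip ln) " " "") "\t" "") ∧
                PySem.Str.replace (PySem.Str.replace (PySem.Str.strip ln) " " "") "\t" "" ≠ "" ∧
                ((PySem.Str.replace (PySem.Str.replace (PySem.Str.strip ln) " " "") "\t" "").toList.all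
                  fun c => PySem.Str.isIn (String.ofList [c]) charset) = true then
              out
            else out ++ [ln]) =
        if ¬ pvDropA m charset ln then out ++ [ln] else out
    by_cases hcore : PySem.Str.strip ln = ""
    · have hnd : ¬ pvDropA m charset ln := fun h => h.1 hcore
      rw [if_pos hcore, if_pos hnd]
    · by_cases hcond : m ≤ PySem.Str.len (PySem.Str.replace (PySem.Str.replace (PySem.Str.strip ln) " " "") "\t" "") ∧
          PySem.Str.replace (PySem.Str.replace (PySem.Str.strip ln) " " "") "\t" "" ≠ "" ∧
          ((PySem.Str.replace (PySem.Str.replace (PySem.Str.strip ln) " " "") "\t" "").toList.all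
            fun c => PySem.Str.isIn (String.ofList [c]) charset) = true
      · have hd : pvDropA m charset ln := ⟨hcore, hcond⟩
        rw [if_neg hcore, if_pos hcond, if_neg (not_not.mpr hd)]
      · have hnd : ¬ pvDropA m charset ln := fun h => hcond h.2
        rw [if_neg hcore, if_neg hcond, if_pos hnd]
  rw [hstep, PySem.List.foldl_append_ite_eq_filter
        (fun ln => ¬ pvDropA m charset ln) (PySem.Str.splitlines text) [], List.nil_append]
  apply List.filter_congr
  intro ln hln
  rw [decide_not, pv_line_key m hm charset ln (hlines ln hln)]

-- ---- splitlines.go step lemmas ----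
theorem pv_go_nil (isB : Char → Bool) (cur : List Char) (acc : List (List Char)) :
    PySem.Chars.splitlines.go isB [] cur acc =
      if cur.isEmpty then acc.reverse else (cur.reverse :: acc).reverse := by
  rw [PySem.Chars.splitlines.go.eq_def]

theorem pv_go_crlf (isB : Char → Bool) (rest cur : List Char) (acc : List (List Char)) :
    PySem.Chars.splitlines.go isB ('\r' :: '\n' :: rest) cur acc =
      PySem.Chars.splitlines.go isB rest [] (cur.reverse :: acc) := by
  rw [PySem.Chars.splitlines.go.eq_def]; rfl

theorem pv_go_break (isB : Char → Bool) (c : Char) (rest cur : List Char) (acc : List (List Char))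
    (hnot : ¬ (c = '\r' ∧ rest.head? = some '\n')) (hB : isB c = true) :
    PySem.Chars.splitlines.go isB (c :: rest) cur acc =
      PySem.Chars.splitlines.go isB rest [] (cur.reverse :: acc) := by
  rw [PySem.Chars.splitlines.go.eq_def]
  split
  · simp_all
  · rename_i heq
    injection heq with h1 h2
    exact absurd ⟨h1, by rw [h2]; rfl⟩ hnot
  · rename_i c' rest' hfalse heq
    injection heq with h1 h2
    subst h1; subst h2
    rw [if_pos hB]

theorem pv_go_keep (isB : Char → Bool) (c : Char) (rest cur : List Char) (acc : List (List Char))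
    (hnot : ¬ (c = '\r' ∧ rest.head? = some '\n')) (hB : isB c = false) :
    PySem.Chars.splitlines.go isB (c :: rest) cur acc =
      PySem.Chars.splitlines.go isB rest (c :: cur) acc := by
  rw [PySem.Chars.splitlines.go.eq_def]
  split
  · simp_all
  · rename_i heq
    injection heq with h1 h2
    exact absurd ⟨h1, by rw [h2]; rfl⟩ hnot
  · rename_i c' rest' hfalse heq
    injection heq with h1 h2
    subst h1; subst h2
    rw [hB]
    simp

-- accumulator lemma for splitlines.go
theorem pv_go_acc (isB : Char → Bool) :
    ∀ (n : Nat) (s : List Char), s.length ≤ n → ∀ (cur : List Char) (acc : List (List Char)),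
      PySem.Chars.splitlines.go isB s cur acc =
        acc.reverse ++ PySem.Chars.splitlines.go isB s cur [] := by
  intro n
  induction n with
  | zero =>
    intro s hs cur acc
    have : s = [] := List.length_eq_zero_iff.mp (Nat.le_zero.mp hs)
    subst this
    rw [pv_go_nil, pv_go_nil]
    by_cases h : cur.isEmpty <;> simp [h]
  | succ n ih =>
    intro s hs cur acc
    match s with
    | [] =>
      rw [pv_go_nil, pv_go_nil]
      by_cases h : cur.isEmpty <;> simp [h]
    | c :: rest =>
      by_cases hcr : c = '\r' ∧ rest.head? = some '\n'
      · obtain ⟨hc, hh⟩ := hcr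
        subst hc
        cases rest with
        | nil => simp at hh
        | cons c2 r =>
          have hc2 : c2 = '\n' := by simpa using hh
          subst hc2
          rw [pv_go_crlf, pv_go_crlf,
              ih r (by simp at hs; omega) [] (cur.reverse :: acc),
              ih r (by simp at hs; omega) [] [cur.reverse]]
          simp
      · by_cases hB : isB c = true
        · rw [pv_go_break isB c rest cur acc hcr hB, pv_go_break isB c rest cur [] hcr hB,
              ih rest (by simp at hs; omega) [] (cur.reverse :: acc),
              ih rest (by simp at hs; omega) [] [cur.reverse]]
          simp
        · rw [pv_go_keep isB c rest cur acc hcr (by simpa using hB),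
              pv_go_keep isB c rest cur [] hcr (by simpa using hB)]
          exact ih rest (by simp at hs; omega) (c :: cur) acc

-- for characters in the domain, pvIsB is exactly '\n' or '\r'
theorem pv_isB_dom (c : Char) (hdom : pvDomChar c = true) :
    pvIsB c = decide (c = '\n' ∨ c = '\r') := by
  unfold pvDomChar at hdom
  simp only [Bool.or_eq_true, Bool.and_eq_true, decide_eq_true_eq, beq_iff_eq] at hdom
  by_cases h10 : c.toNat = 10
  · have : c = '\n' := pv_char_eq_of_toNat c '\n' h10
    subst this; rfl
  · by_cases h13 : c.toNat = 13
    · have : c = '\r' := pv_char_eq_of_toNat c '\r' h13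
      subst this; rfl
    · have hne1 : c ≠ '\n' := fun h => h10 (by rw [h]; rfl)
      have hne2 : c ≠ '\r' := fun h => h13 (by rw [h]; rfl)
      have : pvIsB c = false := by
        unfold pvIsB
        simp only [Bool.or_eq_false_iff, decide_eq_false_iff_not]
        omega
      rw [this]
      simp [hne1, hne2]

theorem pv_not_and_aux (a : Bool) (x m : Int) : (!a || decide (x < m)) = !(decide (m ≤ x) && a) := by
  by_cases h : m ≤ x
  · rw [decide_eq_true h, decide_eq_false (not_lt.mpr h)]; simp
  · rw [decide_eq_false h, decide_eq_true (not_le.mp h)]; simp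

-- the streaming keep-decision equals the negated bar test on the buffered line
theorem pv_keep_eq (m : Int) (allowed : PySem.Set Char) (buf : List Char) :
    ((!((buf.filter fun c => !(c == ' ') && !(c == '\t')).all fun c => PySem.Set.contains allowed c)) ||
      decide ((((buf.filter fun c => !(c == ' ') && !(c == '\t')).length : Int) < m)))
      = !pvIsBar m allowed (String.ofList buf) := by
  unfold pvIsBar
  simp only [String.toList_ofList]
  exact pv_not_and_aux _ _ _

-- the streaming pass computes exactly the non-bar lines (invariants baked into the arguments)
theorem pv_stream_eq (m : Int) (allowed : PySem.Set Char) :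
    ∀ (n : Nat) (s : List Char), s.length ≤ n → (∀ c ∈ s, pvDomChar c = true) →
      ∀ (buf : List Char) (kept : List String),
      pvStreamGo m allowed s buf
          (buf.filter fun c => !(c == ' ') && !(c == '\t')).length
          (!((buf.filter fun c => !(c == ' ') && !(c == '\t')).all fun c => PySem.Set.contains allowed c))
          kept
        = kept ++ ((PySem.Chars.splitlines.go pvIsB s buf.reverse []).map String.ofList).filter
            (fun ln => !pvIsBar m allowed ln) := by
  intro n
  induction n with
  | zero =>
    intro s hs _ buf kept
    have : s = [] := List.length_eq_zero_iff.mp (Nat.le_zero.mp hs)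
    subst this
    rw [pvStreamGo, pv_go_nil]
    by_cases hb : buf = []
    · subst hb; simp
    · have hne : ¬ (buf.reverse.isEmpty = true) := by simpa using hb
      rw [if_neg hb, if_neg hne]
      rw [pv_keep_eq m allowed buf]
      simp only [List.reverse_nil, List.reverse_cons, List.nil_append, List.map_cons,
        List.map_nil, List.reverse_reverse, List.filter]
      by_cases hk : pvIsBar m allowed (String.ofList buf) = true <;> simp [hk]
  | succ n ih =>
    intro s hs hdom buf kept
    match s with
    | [] =>
      rw [pvStreamGo, pv_go_nil]
      by_cases hb : buf = []
      · subst hb; simp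
      · have hne : ¬ (buf.reverse.isEmpty = true) := by simpa using hb
        rw [if_neg hb, if_neg hne]
        rw [pv_keep_eq m allowed buf]
        simp only [List.reverse_nil, List.reverse_cons, List.nil_append, List.map_cons,
          List.map_nil, List.reverse_reverse, List.filter]
        by_cases hk : pvIsBar m allowed (String.ofList buf) = true <;> simp [hk]
    | c :: rest =>
      have hdomc : pvDomChar c = true := hdom c List.mem_cons_self
      have hdomr : ∀ x ∈ rest, pvDomChar x = true := fun x hx => hdom x (List.mem_cons_of_mem _ hx)
      by_cases hbr : c = '\n' ∨ c = '\r'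
      · rw [pvStreamGo, if_pos hbr]
        have hBc : pvIsB c = true := by
          rw [pv_isB_dom c hdomc]; simpa using hbr
        by_cases hcr : c = '\r' ∧ rest.head? = some '\n'
        · rw [if_pos hcr]
          obtain ⟨hc, hh⟩ := hcr
          subst hc
          cases rest with
          | nil => simp at hh
          | cons c2 r =>
            have hc2 : c2 = '\n' := by simpa using hh
            subst hc2
            have hr : r.length ≤ n := by simp at hs; omega
            have hdr : ∀ x ∈ r, pvDomChar x = true :=
              fun x hx => hdomr x (List.mem_cons_of_mem _ hx)
            have hih := ih r hr hdr [] (if (!((buf.filter fun c => !(c == ' ') && !(c == '\t')).all fun c => PySem.Set.contains allowed c)) ||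
                decide ((((buf.filter fun c => !(c == ' ') && !(c == '\t')).length : Int) < m)) then
                kept ++ [String.ofList buf] else kept)
            simp only [List.filter_nil, List.length_nil, List.all_nil, Bool.not_true] at hih
            rw [List.tail_cons, hih, pv_go_crlf]
            simp only [List.reverse_reverse, List.reverse_nil]
            rw [pv_go_acc pvIsB r.length r (Nat.le_refl _) [] [buf],
                pv_keep_eq m allowed buf]
            simp only [List.reverse_cons, List.reverse_nil, List.nil_append, List.map_append,
              List.map_cons, List.map_nil, List.filter_append, List.filter]
            by_cases hk : pvIsBar m allowed (String.ofList buf) = true <;> simp [hk]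
        · rw [if_neg hcr]
          have hr : rest.length ≤ n := by simp at hs; omega
          have hih := ih rest hr hdomr [] (if (!((buf.filter fun c => !(c == ' ') && !(c == '\t')).all fun c => PySem.Set.contains allowed c)) ||
              decide ((((buf.filter fun c => !(c == ' ') && !(c == '\t')).length : Int) < m)) then
              kept ++ [String.ofList buf] else kept)
          simp only [List.filter_nil, List.length_nil, List.all_nil, Bool.not_true] at hih
          rw [hih, pv_go_break pvIsB c rest buf.reverse [] hcr hBc]
          simp only [List.reverse_reverse, List.reverse_nil]
          rw [pv_go_acc pvIsB rest.length rest (Nat.le_refl _) [] [buf],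
              pv_keep_eq m allowed buf]
          simp only [List.reverse_cons, List.reverse_nil, List.nil_append, List.map_append,
            List.map_cons, List.map_nil, List.filter_append, List.filter]
          by_cases hk : pvIsBar m allowed (String.ofList buf) = true <;> simp [hk]
      · have hBc : pvIsB c = false := by
          rw [pv_isB_dom c hdomc]; simpa using hbr
        have hgo := pv_go_keep pvIsB c rest buf.reverse []
          (fun h => hbr (Or.inr h.1)) hBc
        have hrev : c :: buf.reverse = (buf ++ [c]).reverse := by simp
        have hr : rest.length ≤ n := by simp at hs; omega
        by_cases hws : c = ' ' ∨ c = '\t'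
        · rw [pvStreamGo, if_neg hbr, if_pos hws]
          have hnw : (!(c == ' ') && !(c == '\t')) = false := by
            rcases hws with h | h <;> simp [h]
          have hfil : (buf ++ [c]).filter (fun c => !(c == ' ') && !(c == '\t'))
              = buf.filter (fun c => !(c == ' ') && !(c == '\t')) := by
            rw [List.filter_append]; simp [List.filter, hnw]
          have hih := ih rest hr hdomr (buf ++ [c]) kept
          rw [hfil] at hih
          rw [hih, hgo, hrev]
        · rw [pvStreamGo, if_neg hbr, if_neg hws]
          have hnw : (!(c == ' ') && !(c == '\t')) = true := by
            simp only [not_or] at hws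
            simp [hws.1, hws.2]
          have hfil : (buf ++ [c]).filter (fun c => !(c == ' ') && !(c == '\t'))
              = buf.filter (fun c => !(c == ' ') && !(c == '\t')) ++ [c] := by
            rw [List.filter_append]; simp [List.filter, hnw]
          have hih := ih rest hr hdomr (buf ++ [c]) kept
          rw [hfil] at hih
          simp only [List.length_append, List.length_cons, List.length_nil, List.all_append,
            List.all_cons, List.all_nil, Bool.and_true, Bool.not_and] at hih
          rw [hgo, hrev]
          exact hih

-- lines of a Dom text contain only printable-ASCII-or-tab characters
theorem pv_splitlines_go_mem (isB : Char → Bool) :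
    ∀ (fuel : Nat) (s cur : List Char) (acc : List (List Char)), s.length ≤ fuel →
      ∀ l ∈ PySem.Chars.splitlines.go isB s cur acc, ∀ c ∈ l,
        c ∈ acc.flatten ∨ c ∈ cur ∨ (c ∈ s ∧ isB c = false) := by
  intro fuel
  induction fuel with
  | zero =>
    intro s cur acc hs l hl c hc
    cases s with
    | cons a t => simp at hs
    | nil =>
      rw [PySem.Chars.splitlines.go.eq_def] at hl
      split at hl
      · split at hl
        · exact Or.inl (List.mem_flatten.mpr ⟨l, List.mem_reverse.mp hl, hc⟩)
        · rcases List.mem_cons.mp (List.mem_reverse.mp hl) with hl' | hl'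
          · exact Or.inr (Or.inl (List.mem_reverse.mp (hl' ▸ hc)))
          · exact Or.inl (List.mem_flatten.mpr ⟨l, hl', hc⟩)
      · simp_all
      · simp_all
  | succ n ih =>
    intro s cur acc hs l hl c hc
    cases s with
    | nil =>
      rw [PySem.Chars.splitlines.go.eq_def] at hl
      split at hl
      · split at hl
        · exact Or.inl (List.mem_flatten.mpr ⟨l, List.mem_reverse.mp hl, hc⟩)
        · rcases List.mem_cons.mp (List.mem_reverse.mp hl) with hl' | hl'
          · exact Or.inr (Or.inl (List.mem_reverse.mp (hl' ▸ hc)))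
          · exact Or.inl (List.mem_flatten.mpr ⟨l, hl', hc⟩)
      · simp_all
      · simp_all
    | cons a t =>
      rw [PySem.Chars.splitlines.go.eq_def] at hl
      split at hl
      · simp_all
      · rename_i cur' acc' u1 u2 u3 rest heq
        injection heq with ha ht
        subst ha; subst ht
        have hlen : rest.length ≤ n := by
          simp at hs; omega
        have := ih rest [] (cur'.reverse :: acc') hlen l hl c hc
        rcases this with h | h | ⟨h1, h2⟩
        · rw [List.flatten_cons] at h
          rcases List.mem_append.mp h with h | h
          · exact Or.inr (Or.inl (List.mem_reverse.mp h))
          · exact Or.inl h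
        · simp at h
        · exact Or.inr (Or.inr ⟨by simp [h1], h2⟩)
      · rename_i cur' acc' u1 u2 u3 c' rest hne heq
        injection heq with ha ht
        subst ht
        rw [← ha] at hl
        have hlen : t.length ≤ n := by simp at hs; omega
        by_cases hb : isB a = true
        · rw [if_pos hb] at hl
          have := ih t [] (cur'.reverse :: acc') hlen l hl c hc
          rcases this with h | h | ⟨h1, h2⟩
          · rw [List.flatten_cons] at h
            rcases List.mem_append.mp h with h | h
            · exact Or.inr (Or.inl (List.mem_reverse.mp h))
            · exact Or.inl h
          · simp at h
          · exact Or.inr (Or.inr ⟨List.mem_cons_of_mem _ h1, h2⟩)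
        · rw [if_neg hb] at hl
          have := ih t (a :: cur') acc' hlen l hl c hc
          rcases this with h | h | ⟨h1, h2⟩
          · exact Or.inl h
          · rcases List.mem_cons.mp h with h' | h'
            · exact Or.inr (Or.inr ⟨by simp [h'], by simpa [h'] using hb⟩)
            · exact Or.inr (Or.inl h')
          · exact Or.inr (Or.inr ⟨List.mem_cons_of_mem _ h1, h2⟩)

theorem pv_splitlines_mem (s l : List Char) (hl : l ∈ PySem.Chars.splitlines s) (c : Char)
    (hc : c ∈ l) :
    c ∈ s ∧ c.toNat ≠ 10 ∧ c.toNat ≠ 13 := by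
  unfold PySem.Chars.splitlines at hl
  have h := pv_splitlines_go_mem _ s.length s [] [] (Nat.le_refl _) l hl c hc
  simp only [List.flatten_nil, List.not_mem_nil, false_or] at h
  refine ⟨h.1, ?_, ?_⟩ <;>
  · have h2 := h.2
    simp only [Bool.or_eq_false_iff, decide_eq_false_iff_not] at h2
    omega

theorem pv_line_chars (text : String) (hdom : pvDomStr text = true) (ln : String)
    (hln : ln ∈ PySem.Str.splitlines text) : ∀ c ∈ ln.toList, pvLineOk c := by
  intro c hc
  unfold PySem.Str.splitlines at hln
  obtain ⟨l, hl, rfl⟩ := List.mem_map.mp hln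
  rw [String.toList_ofList] at hc
  obtain ⟨hmem, h10, h13⟩ := pv_splitlines_mem text.toList l hl c hc
  have hdc : pvDomChar c = true := List.all_eq_true.mp hdom c hmem
  unfold pvDomChar at hdc
  simp only [Bool.or_eq_true, Bool.and_eq_true, decide_eq_true_eq, beq_iff_eq] at hdc
  unfold pvLineOk
  omega

-- ===== VERDICT (by name: the statement is the Claim_ definition above) =====
theorem drop_ascii_bar_lines_py_spec : Claim_equal_drop_ascii_bar_lines_py := by
  intro text m charset hdom
  unfold Spec_drop_ascii_bar_lines_py drop_ascii_bar_lines_py drop_ascii_bar_lines_py_alt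
  by_cases hg : m ≤ 0 ∨ text = ""
  · rw [if_pos hg, if_pos hg]
  · rw [if_neg hg, if_neg hg]
    have hm : 0 < m := by rw [not_or] at hg; omega
    have hdomt : pvDomStr text = true := by
      unfold Dom_drop_ascii_bar_lines_py at hdom
      simp only [Bool.and_eq_true] at hdom
      exact hdom.1.1
    rw [pv_lines_eq text m hm charset (pv_line_chars text hdomt)]
    have hstream := pv_stream_eq m (PySem.Set.ofList charset.toList) text.toList.length
      text.toList (Nat.le_refl _) (fun c hc => List.all_eq_true.mp hdomt c hc) [] []
    simp only [List.filter_nil, List.length_nil, List.all_nil, Bool.not_true,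
      List.reverse_nil, List.nil_append] at hstream
    rw [hstream]
    unfold PySem.Str.splitlines
    rw [pv_splitlines_eq_go]
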